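-- pv_equiv track=rewrite | github.com/seulmi0827/seulmi | sesac_python/week2_sm/15 배열 만들기 4.py | solution
-- ===== SOURCE A (Python) =====
-- def solution(arr):
--     stk = []
--     i=0
--     while len(arr) > i:
--         if len(stk)==0:
--             stk.append(arr[i])
--             i+=1
--         elif stk[-1] < arr[i]:
--             stk.append(arr[i])
--             i+=1
--         else :
--             stk.remove(stk[-1])
--     return stk
-- ===== SOURCE B (Python) =====
-- def solution(arr):
--     # strict suffix-minima scan: an element survives A's stack iff it is
--     # strictly smaller than every element to its right
--     res = []
--     m = None
--     for x in reversed(arr):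
--         if m is None or x < m:
--             res.append(x)
--             m = x
--     res.reverse()
--     return res
-- ===== Notes on version B (the rewrite author's own statement) =====
-- stated objective: faster
-- what changed: Replaced the stack simulation (push, or pop the top until it is below the incoming element) by a single right-to-left scan keeping a running minimum: an element is kept iff it is strictly below the minimum of everything to its right.
import Mathlib
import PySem

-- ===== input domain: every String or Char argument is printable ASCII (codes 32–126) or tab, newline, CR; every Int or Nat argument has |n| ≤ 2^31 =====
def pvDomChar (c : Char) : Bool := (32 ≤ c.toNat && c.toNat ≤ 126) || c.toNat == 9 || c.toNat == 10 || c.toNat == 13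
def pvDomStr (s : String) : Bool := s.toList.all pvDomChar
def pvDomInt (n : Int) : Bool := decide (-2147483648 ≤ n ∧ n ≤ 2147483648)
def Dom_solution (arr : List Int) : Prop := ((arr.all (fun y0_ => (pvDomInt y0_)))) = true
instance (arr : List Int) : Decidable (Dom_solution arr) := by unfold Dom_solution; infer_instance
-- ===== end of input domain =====

-- B replaces A's stack simulation by a right-to-left running-minimum scan (a timing run measured B faster).

-- ===== PORT A =====
-- termination helper for the pop branch: stk.remove(stk[-1]) shortens the stack
theorem pvRemoveGetDLen {stk : List Int} {v : Int} (hv : v ∈ stk) :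
    ((PySem.List.remove? stk v).getD []).length < stk.length := by
  rw [PySem.List.remove?_eq_some_erase stk v hv]
  have h1 := List.length_erase_of_mem hv
  have h2 : 0 < stk.length := List.length_pos_of_mem hv
  simp only [Option.getD_some]
  omega

-- the while-loop of A: state is (stk, i)
def solutionGo (arr : List Int) (stk : List Int) (i : Nat) : List Int :=
  if h : i < arr.length then
    if hs : stk = [] then
      solutionGo arr (stk ++ [arr[i]]) (i + 1)
    else if stk.getLast hs < arr[i] then
      solutionGo arr (stk ++ [arr[i]]) (i + 1)
    else
      solutionGo arr ((PySem.List.remove? stk (stk.getLast hs)).getD []) i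
  else stk
termination_by 2 * (arr.length - i) + stk.length
decreasing_by
  · simp; omega
  · simp; omega
  · have := pvRemoveGetDLen (List.getLast_mem hs)
    omega

def solution (arr : List Int) : List Int := solutionGo arr [] 0

-- ===== PORT B =====
-- for x in reversed(arr): if m is None or x < m: res.append(x); m = x
def solution_alt (arr : List Int) : List Int :=
  (arr.reverse.foldl
    (fun (s : List Int × Option Int) x =>
      match s.2 with
      | none => (s.1 ++ [x], some x)
      | some m => if x < m then (s.1 ++ [x], some x) else s)
    ([], none)).1.reverse

-- ===== PRECONDITION & SPEC =====
def Spec_solution (arr : List Int) (out : List Int) : Prop := out = solution_alt arr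
instance (arr : List Int) (out : List Int) : Decidable (Spec_solution arr out) := by unfold Spec_solution; infer_instance

-- ===== CLAIM (what is proved, stated in full; the proofs are below) =====
def Claim_equal_solution : Prop := ∀ (arr : List Int), Dom_solution arr → Spec_solution arr (solution arr)

-- ===== LEMMAS AND PROOFS =====

-- reference function: the strict suffix minima of the list
def smin : List Int → List Int
  | [] => []
  | x :: xs => if xs.all (fun y => decide (x < y)) then x :: smin xs else smin xs

-- elements of a strictly increasing list are ≤ its last element
theorem le_getLast {l : List Int} (hp : l.Pairwise (· < ·)) {a : Int} (ha : a ∈ l)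
    (hne : l ≠ []) : a ≤ l.getLast hne := by
  induction l with
  | nil => simp at ha
  | cons x t ih =>
    rcases List.mem_cons.1 ha with rfl | hat
    · cases t with
      | nil => simp [List.getLast]
      | cons y u =>
        have hlt : a < (y :: u).getLast (by simp) :=
          (List.pairwise_cons.1 hp).1 _ (List.getLast_mem (by simp))
        rw [List.getLast_cons (by simp)]
        exact le_of_lt hlt
    · have ht : t ≠ [] := List.ne_nil_of_mem hat
      rw [List.getLast_cons ht]
      exact ih (List.pairwise_cons.1 hp).2 hat ht

-- removing the last value of a strictly increasing nonempty list = dropLast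
theorem remove_getLast {l : List Int} (hp : l.Pairwise (· < ·)) (hne : l ≠ []) :
    (PySem.List.remove? l (l.getLast hne)).getD [] = l.dropLast := by
  induction l with
  | nil => exact absurd rfl hne
  | cons x t ih =>
    cases t with
    | nil => simp [PySem.List.remove?_cons_self, List.getLast]
    | cons y u =>
      have ht : (y :: u) ≠ [] := by simp
      rw [List.getLast_cons ht]
      have hx : x ≠ (y :: u).getLast ht :=
        ne_of_lt ((List.pairwise_cons.1 hp).1 _ (List.getLast_mem ht))
      have hsome := PySem.List.remove?_eq_some_erase (y :: u) _ (List.getLast_mem ht)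
      have hih := ih (List.pairwise_cons.1 hp).2 ht
      rw [hsome] at hih
      rw [PySem.List.remove?_cons_of_ne _ hx, hsome]
      simp only [Option.map_some, Option.getD_some] at hih ⊢
      simp [hih]

-- main invariant for A's loop: strict suffix minima of the rest, after filtering the stack
theorem solutionGo_eq (arr : List Int) : ∀ (n : Nat) (stk : List Int) (i : Nat),
    2 * (arr.length - i) + stk.length ≤ n →
    stk.Pairwise (· < ·) →
    solutionGo arr stk i =
      stk.filter (fun s => (arr.drop i).all (fun y => decide (s < y))) ++ smin (arr.drop i) := by
  intro n
  induction n with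
  | zero =>
    intro stk i hn hp
    have hi : ¬ i < arr.length := by omega
    have hstk : stk = [] := by
      cases stk with
      | nil => rfl
      | cons a t => simp at hn
    subst hstk
    rw [solutionGo, dif_neg hi, List.drop_eq_nil_of_le (by omega : arr.length ≤ i)]
    simp [smin]
  | succ n ih =>
    intro stk i hn hp
    by_cases h : i < arr.length
    · have hdrop : arr.drop i = arr[i] :: arr.drop (i + 1) :=
        (List.getElem_cons_drop h).symm
      by_cases hs : stk = []
      · subst hs
        rw [solutionGo]
        simp only [dif_pos h]
        rw [show ([] : List Int) ++ [arr[i]] = [arr[i]] by simp]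
        rw [ih [arr[i]] (i + 1)
          (by simp only [List.length_nil] at hn; simp only [List.length_singleton]; omega) (by simp)]
        rw [hdrop, smin]
        cases hc : (arr.drop (i + 1)).all (fun y => decide (arr[i] < y)) with
        | true => simp [hc]
        | false => simp [hc]
      · by_cases hlt : stk.getLast hs < arr[i]
        · -- push branch
          have hall : ∀ s ∈ stk, s < arr[i] := fun s hsm =>
            lt_of_le_of_lt (le_getLast hp hsm hs) hlt
          have hp' : (stk ++ [arr[i]]).Pairwise (· < ·) := by
            rw [List.pairwise_append]
            exact ⟨hp, by simp, by simpa using hall⟩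
          rw [solutionGo]
          simp only [dif_pos h, dif_neg hs, if_pos hlt]
          rw [ih (stk ++ [arr[i]]) (i + 1)
            (by simp only [List.length_append, List.length_singleton]; omega) hp']
          rw [hdrop, List.filter_append]
          have hfc := List.filter_congr
            (p := fun (s : Int) => (arr.drop (i + 1)).all (fun y => decide (s < y)))
            (q := fun (s : Int) => (arr[i] :: arr.drop (i + 1)).all (fun y => decide (s < y)))
            (l := stk)
            (by intro a ha
                have hd : decide (a < arr[i]) = true := decide_eq_true (hall a ha)
                simp only [List.all_cons, hd, Bool.true_and])
          rw [hfc, smin]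
          cases hc : (arr.drop (i + 1)).all (fun y => decide (arr[i] < y)) with
          | true => simp [hc]
          | false => simp [hc]
        · -- pop branch
          rw [solutionGo]
          simp only [dif_pos h, dif_neg hs, if_neg hlt]
          rw [remove_getLast hp hs]
          rw [ih stk.dropLast i (by have hd := stk.length_dropLast; have hpos : 0 < stk.length := List.length_pos_iff.2 hs; omega)
              (hp.sublist (List.dropLast_sublist stk))]
          congr 1
          conv_rhs => rw [← List.dropLast_append_getLast hs]
          rw [List.filter_append]
          have hfalse : (arr.drop i).all (fun y => decide (stk.getLast hs < y)) = false := by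
            rw [hdrop, List.all_cons]
            have hd : decide (stk.getLast hs < arr[i]) = false := decide_eq_false hlt
            rw [hd, Bool.false_and]
          simp [hfalse]
    · rw [solutionGo, dif_neg h, List.drop_eq_nil_of_le (by omega : arr.length ≤ i)]
      simp [smin]

theorem solution_eq_smin (arr : List Int) : solution arr = smin arr := by
  unfold solution
  rw [solutionGo_eq arr (2 * arr.length) [] 0 (by simp) (by simp)]
  simp

-- main invariant for B's fold: result reversed = strict suffix minima; second component = running min
theorem alt_fold_eq (l : List Int) :
    (l.foldr (fun x (s : List Int × Option Int) =>
      match s.2 with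
      | none => (s.1 ++ [x], some x)
      | some m => if x < m then (s.1 ++ [x], some x) else s) ([], none)).1
      = (smin l).reverse ∧
    ((l.foldr (fun x (s : List Int × Option Int) =>
      match s.2 with
      | none => (s.1 ++ [x], some x)
      | some m => if x < m then (s.1 ++ [x], some x) else s) ([], none)).2.elim
      (l = []) (fun v => v ∈ l ∧ ∀ y ∈ l, v ≤ y)) := by
  induction l with
  | nil => simp [smin]
  | cons x xs ih =>
    obtain ⟨h1, h2⟩ := ih
    rw [List.foldr_cons]
    cases hm : (xs.foldr (fun x (s : List Int × Option Int) =>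
      match s.2 with
      | none => (s.1 ++ [x], some x)
      | some m => if x < m then (s.1 ++ [x], some x) else s) ([], none)).2 with
    | none =>
      rw [hm] at h2
      simp only [Option.elim] at h2
      subst h2
      simp only [h1]
      constructor
      · simp [smin]
      · simp
    | some v =>
      rw [hm] at h2
      simp only [Option.elim] at h2
      obtain ⟨hv, hvle⟩ := h2
      by_cases hx : x < v
      · simp only [if_pos hx]
        constructor
        · have hc : xs.all (fun y => decide (x < y)) = true := by
            simp only [List.all_eq_true, decide_eq_true_eq]
            exact fun y hy => lt_of_lt_of_le hx (hvle y hy)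
          simp only [smin, if_pos hc, List.reverse_cons, h1]
        · refine ⟨List.mem_cons_self, ?_⟩
          intro y hy
          rcases List.mem_cons.1 hy with rfl | hy
          · exact le_refl _
          · exact le_of_lt (lt_of_lt_of_le hx (hvle y hy))
      · simp only [hm, if_neg hx]
        constructor
        · have hc : xs.all (fun y => decide (x < y)) = false := by
            simp only [List.all_eq_false]
            exact ⟨v, hv, by simpa using hx⟩
          simp only [smin, hc, Bool.false_eq_true, if_false, h1]
        · refine ⟨List.mem_cons.2 (Or.inr hv), ?_⟩
          intro y hy
          rcases List.mem_cons.1 hy with rfl | hy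
          · exact not_lt.1 hx
          · exact hvle y hy

theorem alt_eq_smin (arr : List Int) : solution_alt arr = smin arr := by
  unfold solution_alt
  simp only [List.foldl_reverse]
  rw [(alt_fold_eq arr).1]
  simp

-- ===== VERDICT (by name: the statement is the Claim_ definition above) =====
theorem solution_spec : Claim_equal_solution := by
  intro arr _
  unfold Spec_solution
  rw [solution_eq_smin, alt_eq_smin]
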